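-- pv_equiv track=rewrite | github.com/Teddy-Li/LMKBC-Track1 | organize_added_data.py | filter_str
-- ===== SOURCE A (Python) =====
-- def filter_str(string: str) -> bool:
--     if string[0] == 'Q' and string[1:].isdigit():
--         return False
--     stoptokens = ['-', '(', ')', ',', '\\']
--     for tok in stoptokens:
--         if tok in string:
--             return False
--     return True
-- ===== SOURCE B (Python) =====
-- def filter_str(string: str) -> bool:
--     if string[0] == 'Q' and string[1:].isdigit():
--         return False
--     return not any(c in '-(),\\' for c in string)
-- ===== Notes on version B (the rewrite author's own statement) =====
-- stated objective: idiomatic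
-- what changed: The loop over the fixed stop-token list doing substring searches is replaced by one pass over the string's characters testing membership in the stop-character string; the Q-ID prefix guard is kept verbatim.
-- outside the precondition, e.g. on filter_str(''): A raises IndexError, B raises IndexError
import Mathlib
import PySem

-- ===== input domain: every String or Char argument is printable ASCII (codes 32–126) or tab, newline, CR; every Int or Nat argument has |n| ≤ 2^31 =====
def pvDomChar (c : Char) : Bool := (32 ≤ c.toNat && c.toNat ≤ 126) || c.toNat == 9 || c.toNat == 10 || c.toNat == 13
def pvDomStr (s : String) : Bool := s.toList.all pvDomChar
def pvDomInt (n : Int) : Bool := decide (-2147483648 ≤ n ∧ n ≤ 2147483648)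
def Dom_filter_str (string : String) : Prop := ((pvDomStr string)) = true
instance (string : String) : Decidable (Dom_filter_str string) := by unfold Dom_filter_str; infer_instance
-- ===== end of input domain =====

-- B replaces the loop over the stop-token list (substring searches) by a single pass
-- over the string's characters against the stop characters; the Q-ID guard is unchanged.

-- ===== PORT A =====
def filter_str (string : String) : Bool :=
  -- string[0] == 'Q' and string[1:].isdigit()
  if PySem.Str.pyGet? string 0 = some 'Q'
      ∧ PySem.Str.strIsdigit (PySem.Str.slice string (some 1) none) = true then
    false
  else
    -- for tok in stoptokens: if tok in string: return False / return True
    if (["-", "(", ")", ",", "\\"] : List String).any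
        (fun tok => PySem.Str.isIn tok string) then false else true

-- ===== PORT B =====
def filter_str_alt (string : String) : Bool :=
  if PySem.Str.pyGet? string 0 = some 'Q'
      ∧ PySem.Str.strIsdigit (PySem.Str.slice string (some 1) none) = true then
    false
  else
    -- not any(c in '-(),\\' for c in string)
    !(string.toList.any (fun c => c ∈ ['-', '(', ')', ',', '\\']))

-- ===== PRECONDITION & SPEC =====
-- Pre_ excludes only the empty string, on which A (and B) raise IndexError at string[0].
def Pre_filter_str (string : String) : Prop := string ≠ ""
instance (string : String) : Decidable (Pre_filter_str string) := by unfold Pre_filter_str; infer_instance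
def pvWitness_filter_str : String := "abc"

def Spec_filter_str (string : String) (out : Bool) : Prop := out = filter_str_alt string
instance (string : String) (out : Bool) : Decidable (Spec_filter_str string out) := by unfold Spec_filter_str; infer_instance

-- ===== CLAIM (what is proved, stated in full; the proofs are below) =====
def Claim_equal_filter_str : Prop := ∀ (string : String), Dom_filter_str string → Pre_filter_str string → Spec_filter_str string (filter_str string)

-- ===== LEMMAS AND PROOFS =====

-- 'tok in string' for a one-character token is character membership.
theorem isIn_singleton (c : Char) (s : String) :
    PySem.Str.isIn (String.ofList [c]) s = s.toList.contains c := by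
  rw [Bool.eq_iff_iff]
  rw [PySem.Str.isIn_iff_infix]
  simp [List.singleton_infix_iff]

-- A's token loop equals B's character scan.
theorem tok_loop_eq (s : String) :
    (["-", "(", ")", ",", "\\"] : List String).any (fun tok => PySem.Str.isIn tok s)
      = s.toList.any (fun c => c ∈ ['-', '(', ')', ',', '\\']) := by
  have h : ∀ c : Char, PySem.Str.isIn (String.ofList [c]) s = s.toList.contains c :=
    fun c => isIn_singleton c s
  simp only [List.any_cons, List.any_nil]
  rw [show ("-" : String) = String.ofList ['-'] from rfl,
      show ("(" : String) = String.ofList ['('] from rfl,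
      show (")" : String) = String.ofList [')'] from rfl,
      show ("," : String) = String.ofList [','] from rfl,
      show ("\\" : String) = String.ofList ['\\'] from rfl,
      h, h, h, h, h]
  rw [Bool.eq_iff_iff]
  simp only [Bool.or_false, Bool.or_eq_true, List.contains_eq_mem, decide_eq_true_iff,
    List.any_eq_true, List.mem_cons, List.not_mem_nil, or_false]
  constructor
  · rintro (h1 | h1 | h1 | h1 | h1) <;> exact ⟨_, h1, by simp⟩
  · rintro ⟨x, hx, h1 | h1 | h1 | h1 | h1⟩ <;> subst h1 <;> tauto

-- ===== VERDICT (by name: the statement is the Claim_ definition above) =====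
theorem filter_str_spec : Claim_equal_filter_str := by
  intro s _ _
  unfold Spec_filter_str filter_str filter_str_alt
  split
  · rfl
  · rw [tok_loop_eq]
    rcases s.toList.any (fun c => c ∈ ['-', '(', ')', ',', '\\']) with _ | _ <;> rfl
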